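-- pv_equiv track=rewrite | github.com/alexandraback/datacollection | solutions_5630113748090880_0/Python/algorithmist/rankNfile.py | getMissingList
-- ===== SOURCE A (Python) =====
-- def getMissingList(heights):
-- 	heights.sort()
-- 	missingNumbers = []
-- 	index = 0
-- 	while index < len(heights):
-- 		if index == len(heights) - 1:
-- 			missingNumbers.append(heights[index])
-- 			break
-- 		else:
-- 			if(heights[index] == heights[index + 1]):
-- 				index += 2
-- 			else:
-- 				missingNumbers.append(heights[index])
-- 				index += 1
-- 	return missingNumbers
-- ===== SOURCE B (Python) =====
-- def getMissingList(heights):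
--     heights.sort()  # keep A's in-place sort side effect
--     counts = {}
--     for v in heights:
--         counts[v] = counts.get(v, 0) + 1
--     return [v for v in counts if counts[v] % 2 == 1]
-- ===== Notes on version B (the rewrite author's own statement) =====
-- stated objective: idiomatic
-- what changed: Replaces the greedy adjacent-pairing index scan over the sorted list with a frequency table: count occurrences in a dict and emit each distinct value whose count is odd (dict insertion order is sorted since the list was sorted).
import Mathlib
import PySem

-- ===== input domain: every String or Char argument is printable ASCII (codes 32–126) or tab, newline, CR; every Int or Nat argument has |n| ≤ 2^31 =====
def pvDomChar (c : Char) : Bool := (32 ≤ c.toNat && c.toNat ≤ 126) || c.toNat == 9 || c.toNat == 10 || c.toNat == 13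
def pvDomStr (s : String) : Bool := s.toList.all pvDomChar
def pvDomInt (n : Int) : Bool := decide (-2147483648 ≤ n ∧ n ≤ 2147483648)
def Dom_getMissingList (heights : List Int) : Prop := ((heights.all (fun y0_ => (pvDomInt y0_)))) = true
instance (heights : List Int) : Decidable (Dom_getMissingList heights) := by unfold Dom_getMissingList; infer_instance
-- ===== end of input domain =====

-- B replaces A's greedy adjacent-pairing scan of the sorted list by a count-and-filter over a
-- frequency dict (same cost); both sort the argument in place in Python — equivalence here is about the return value.


-- ===== PORT A =====
-- A's while loop over the sorted list: index+2 past an adjacent equal pair, else emit and index+1;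
-- the 'index == len-1' branch emits the last element.
def pvLoopA : List Int → List Int
  | [] => []
  | [x] => [x]
  | x :: y :: rest => if x = y then pvLoopA rest else x :: pvLoopA (y :: rest)

def getMissingList (heights : List Int) : List Int :=
  pvLoopA (PySem.List.sorted heights (fun x => x) false)

-- ===== PORT B =====
-- Source B: sort, count into a dict (counts[v] = counts.get(v,0)+1), then
-- [v for v in counts if counts[v] % 2 == 1]  (counts[v] exists for every key, ported as getD).
def pvCounts (s : List Int) : PySem.Dict Int Int :=
  s.foldl (fun d v => d.insert v (d.getD v 0 + 1)) PySem.Dict.empty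

def pvOddKeys (counts : PySem.Dict Int Int) : List Int :=
  counts.keys.filter (fun v => PySem.Int.mod (counts.getD v 0) 2 == 1)

def getMissingList_alt (heights : List Int) : List Int :=
  pvOddKeys (pvCounts (PySem.List.sorted heights (fun x => x) false))

-- ===== PRECONDITION & SPEC =====
def Spec_getMissingList (heights : List Int) (out : List Int) : Prop := out = getMissingList_alt heights
instance (heights : List Int) (out : List Int) : Decidable (Spec_getMissingList heights out) := by unfold Spec_getMissingList; infer_instance

-- ===== CLAIM (what is proved, stated in full; the proofs are below) =====
def Claim_equal_getMissingList : Prop := ∀ (heights : List Int), Dom_getMissingList heights → Spec_getMissingList heights (getMissingList heights)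

-- ===== LEMMAS AND PROOFS =====

-- Set.add on a fresh head commutes with consing it in front.
lemma pv_foldl_add_cons (l : List Int) (s : List Int) (x : Int) (hx : x ∉ l) :
    l.foldl PySem.Set.add (x :: s) = x :: l.foldl PySem.Set.add s := by
  induction l generalizing s with
  | nil => rfl
  | cons y t ih =>
    simp only [List.foldl_cons]
    have hxy : y ≠ x := fun h => hx (h ▸ List.mem_cons_self)
    have hstep : PySem.Set.add (x :: s) y = x :: PySem.Set.add s y := by
      simp only [PySem.Set.add, PySem.Set.contains]
      simp [hxy]
      split_ifs <;> rfl
    rw [hstep]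
    exact ih (PySem.Set.add s y) (fun h => hx (List.mem_cons_of_mem _ h))

lemma pv_dedup_cons_of_not_mem {x : Int} {l : List Int} (hx : x ∉ l) :
    PySem.List.dedup (x :: l) = x :: PySem.List.dedup l := by
  simp only [PySem.List.dedup_eq_ofList, PySem.Set.ofList_eq_foldl, List.foldl_cons]
  have h0 : PySem.Set.add ([] : List Int) x = [x] := rfl
  rw [h0]
  exact pv_foldl_add_cons l [] x hx

lemma pv_dedup_cons_cons (x : Int) (l : List Int) :
    PySem.List.dedup (x :: x :: l) = PySem.List.dedup (x :: l) := by
  simp only [PySem.List.dedup_eq_ofList, PySem.Set.ofList_eq_foldl, List.foldl_cons]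
  congr 1
  simp [PySem.Set.add, PySem.Set.contains]

-- head of a sorted list containing x whose elements are all ≥ x is x itself
lemma pv_sorted_head_eq {x h : Int} {t : List Int}
    (hp : (h :: t).Pairwise (· ≤ ·)) (hmem : x ∈ h :: t)
    (hlb : ∀ v ∈ h :: t, x ≤ v) : h = x := by
  rcases List.mem_cons.mp hmem with h' | h'
  · exact h'.symm
  · have h1 : h ≤ x := (List.pairwise_cons.mp hp).1 x h'
    have h2 : x ≤ h := hlb h List.mem_cons_self
    omega

-- the core fact: A's pairing loop on a sorted list = distinct values with odd count
lemma pv_loopA_eq (s : List Int) (hs : s.Pairwise (· ≤ ·)) :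
    pvLoopA s = (PySem.List.dedup s).filter (fun v => s.count v % 2 == 1) := by
  induction s using pvLoopA.induct with
  | case1 => rfl
  | case2 x =>
    simp [pvLoopA, PySem.List.dedup_eq_ofList, PySem.Set.ofList_eq_foldl,
      PySem.Set.add, PySem.Set.contains, List.count_cons]
  | case3 x rest ih =>
    have hrest : rest.Pairwise (· ≤ ·) := ((List.pairwise_cons.mp hs).2).sublist (List.sublist_cons_self _ _)
    have hlb : ∀ v ∈ rest, x ≤ v := fun v hv =>
      (List.pairwise_cons.mp hs).1 v (List.mem_cons_of_mem _ hv)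
    simp only [pvLoopA]
    rw [ih hrest]
    by_cases hxm : x ∈ rest
    · -- rest starts with x, so dedup (x::x::rest) = dedup rest; x's count shifts by 2
      obtain ⟨hd, t, rfl⟩ : ∃ hd t, rest = hd :: t := by
        cases rest with
        | nil => exact absurd hxm List.not_mem_nil
        | cons hd t => exact ⟨hd, t, rfl⟩
      have hhead : hd = x := pv_sorted_head_eq hrest hxm hlb
      subst hhead
      rw [pv_dedup_cons_cons, pv_dedup_cons_cons]
      refine (List.filter_congr ?_).symm
      intro v _
      by_cases hvx : hd = v
      · subst hvx; simp; omega
      · simp [hvx]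
    · -- x occurs exactly twice: even, so it is filtered out
      rw [pv_dedup_cons_cons, pv_dedup_cons_of_not_mem hxm, List.filter_cons]
      have hc : ((x :: x :: rest).count x % 2 == 1) = false := by
        simp [List.count_eq_zero_of_not_mem hxm]
      rw [hc]
      refine (List.filter_congr ?_).symm
      intro v hv
      have hvx : ¬ x = v := fun h => hxm (h ▸ (PySem.List.mem_dedup rest v).mp hv)
      simp [hvx]
  | case4 x y rest hxy ih =>
    have h1 := List.pairwise_cons.mp hs
    have htail : (y :: rest).Pairwise (· ≤ ·) := h1.2
    have hxm : x ∉ y :: rest := by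
      intro hm
      rcases List.mem_cons.mp hm with hm | hm
      · exact hxy hm
      · have hyx : y ≤ x := (List.pairwise_cons.mp htail).1 x hm
        have hxy' : x ≤ y := h1.1 y List.mem_cons_self
        exact hxy (by omega)
    simp only [pvLoopA, if_neg hxy]
    rw [ih htail, pv_dedup_cons_of_not_mem hxm, List.filter_cons]
    have hc : ((x :: y :: rest).count x % 2 == 1) = true := by
      simp [List.count_eq_zero_of_not_mem hxm]
    rw [hc]
    congr 1
    refine (List.filter_congr ?_).symm
    intro v hv
    have hvx : ¬ x = v := fun h => hxm (h ▸ (PySem.List.mem_dedup (y :: rest) v).mp hv)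
    simp [List.count_cons, hvx]

-- ===== VERDICT (by name: the statement is the Claim_ definition above) =====
theorem getMissingList_spec : Claim_equal_getMissingList := by
  intro heights _
  unfold Spec_getMissingList getMissingList getMissingList_alt pvOddKeys pvCounts
  set s := PySem.List.sorted heights (fun x => x) false with hsdef
  have hs : s.Pairwise (· ≤ ·) := PySem.List.sorted_pairwise heights (fun x => x)
  rw [PySem.Dict.foldl_insert_getD_add_one_eq_counter, PySem.Dict.keys_counter,
    pv_loopA_eq s hs]
  simp only [PySem.List.dedup_eq_ofList]
  refine List.filter_congr ?_
  intro v _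
  rw [PySem.Dict.getD_counter]
  have hm : PySem.Int.mod ((s.count v : Nat) : Int) 2 = ((s.count v % 2 : Nat) : Int) := by
    exact_mod_cast PySem.Int.mod_natCast (s.count v) 2
  rw [hm]
  rcases Nat.mod_two_eq_zero_or_one (s.count v) with h | h <;> simp [h]
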